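-- pv_equiv track=rewrite | github.com/quippy-dev/nextgenmap | nextgenmap.py | strip_output_flags
-- ===== SOURCE A (Python) =====
-- def strip_output_flags(command_list):
--     output_flags = {"-oX", "-oA"}
--     new_command_list = []
--     i = 0
--     while i < len(command_list):
--         arg = command_list[i]
--         if arg not in output_flags:
--             new_command_list.append(arg)
--         else:
--             # Skip the next argument if it's a single dash or doesn't start with a dash
--             if i < len(command_list) - 1 and (command_list[i + 1] == '-' or not command_list[i + 1].startswith('-')):
--                 i += 1
--         i += 1
--     return new_command_list
-- ===== SOURCE B (Python) =====
-- def strip_output_flags(command_list):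
--     output_flags = {"-oX", "-oA"}
--     remove = []
--     for i, arg in enumerate(command_list):
--         if arg in output_flags:
--             remove.append(i)
--             if i + 1 < len(command_list) and (command_list[i + 1] == '-' or not command_list[i + 1].startswith('-')):
--                 remove.append(i + 1)
--     return [arg for j, arg in enumerate(command_list) if j not in remove]
-- ===== Notes on version B (the rewrite author's own statement) =====
-- stated objective: alternative
-- what changed: Replaced the index-skipping while-loop with a two-phase mark-then-filter pass: first collect the indices of output flags and of their consumed arguments, then keep every position whose index was not marked.
import Mathlib
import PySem

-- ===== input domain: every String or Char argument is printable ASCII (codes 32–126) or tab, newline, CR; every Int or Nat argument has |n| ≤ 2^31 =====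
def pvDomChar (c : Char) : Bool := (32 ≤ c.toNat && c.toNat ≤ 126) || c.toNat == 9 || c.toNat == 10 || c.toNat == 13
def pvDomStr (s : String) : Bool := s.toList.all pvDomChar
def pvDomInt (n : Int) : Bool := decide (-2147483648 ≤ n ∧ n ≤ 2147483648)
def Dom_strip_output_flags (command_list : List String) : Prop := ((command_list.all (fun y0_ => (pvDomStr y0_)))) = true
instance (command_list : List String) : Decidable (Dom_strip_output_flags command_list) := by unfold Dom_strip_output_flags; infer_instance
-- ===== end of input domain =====

-- B replaces A's index-skipping while-loop by a mark-then-filter pass (collect removable indices, then keep the rest); objective: alternative decomposition, same cost.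

-- ===== PORT A =====
-- literal transliteration of A's while-loop: structural recursion, i+=2 on a consumed argument
def strip_output_flags : List String → List String
  | [] => []
  | arg :: rest =>
    if !(arg == "-oX" || arg == "-oA") then
      arg :: strip_output_flags rest
    else
      match rest with
      | [] => []
      | nxt :: rest' =>
        if nxt == "-" || !(PySem.Str.startswith nxt "-") then strip_output_flags rest'
        else strip_output_flags (nxt :: rest')
termination_by cl => cl.length
decreasing_by all_goals (simp only [List.length_cons]; omega)

-- ===== PORT B =====
-- the marking loop of Source B: 'for i, arg in enumerate(command_list): … remove.append(i) …'
def pvRemove (command_list : List String) : List Int :=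
  (PySem.List.enumerate command_list 0).foldl
    (fun remove p =>
      if p.2 == "-oX" || p.2 == "-oA" then
        let remove2 := remove ++ [p.1]
        if p.1 + 1 < (command_list.length : Int) then
          match PySem.List.pyGet? command_list (p.1 + 1) with
          | some nxt =>
            if nxt == "-" || !(PySem.Str.startswith nxt "-") then remove2 ++ [p.1 + 1]
            else remove2
          | none => remove2   -- unreachable: guard p.1+1 < len ensures in range
        else remove2
      else remove) []

def strip_output_flags_alt (command_list : List String) : List String :=
  ((PySem.List.enumerate command_list 0).filter
      (fun p => !((pvRemove command_list).contains p.1))).map (·.2)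

-- ===== PRECONDITION & SPEC =====
def Spec_strip_output_flags (command_list : List String) (out : List String) : Prop := out = strip_output_flags_alt command_list
instance (command_list : List String) (out : List String) : Decidable (Spec_strip_output_flags command_list out) := by unfold Spec_strip_output_flags; infer_instance

-- ===== CLAIM (what is proved, stated in full; the proofs are below) =====
def Claim_equal_strip_output_flags : Prop := ∀ (command_list : List String), Dom_strip_output_flags command_list → Spec_strip_output_flags command_list (strip_output_flags command_list)

-- ===== LEMMAS AND PROOFS =====

-- skip condition of the marking loop at index i
def pvSkip (cl : List String) (i : Int) : Bool :=
  (i + 1 < (cl.length : Int)) &&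
    (match PySem.List.pyGet? cl (i + 1) with
     | some nxt => nxt == "-" || !(PySem.Str.startswith nxt "-")
     | none => false)

-- contribution of one enumerate step to `remove`
def pvH (cl : List String) (p : Int × String) : List Int :=
  if p.2 == "-oX" || p.2 == "-oA" then
    [p.1] ++ (if pvSkip cl p.1 then [p.1 + 1] else [])
  else []

theorem foldl_ext_flatMap {α β : Type} (f : List β → α → List β) (g : α → List β)
    (h : ∀ acc x, f acc x = acc ++ g x) :
    ∀ (l : List α) (acc : List β), l.foldl f acc = acc ++ l.flatMap g := by
  intro l
  induction l with
  | nil => intro acc; simp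
  | cons x xs ih => intro acc; simp [List.foldl_cons, h, ih, List.append_assoc]

theorem flatMap_congr' {α β : Type} {l : List α} {f g : α → List β}
    (h : ∀ x ∈ l, f x = g x) : l.flatMap f = l.flatMap g := by
  induction l with
  | nil => rfl
  | cons x xs ih => simp_all

theorem pvRemove_eq_flatMap (cl : List String) :
    pvRemove cl = (PySem.List.enumerate cl 0).flatMap (pvH cl) := by
  unfold pvRemove
  rw [foldl_ext_flatMap _ (pvH cl) ?_]
  · simp
  · intro acc p
    obtain ⟨i, x⟩ := p
    simp only [pvH, pvSkip]
    rcases hg : PySem.List.pyGet? cl (i + 1) with _ | nxt <;>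
      simp only [hg] <;> split_ifs <;> simp_all <;> try omega

theorem enum_shift (xs : List String) (s : Int) :
    PySem.List.enumerate xs (s + 1) = (PySem.List.enumerate xs s).map (fun p => (p.1 + 1, p.2)) := by
  induction xs generalizing s with
  | nil => simp [PySem.List.enumerate_nil]
  | cons x xs ih => simp [PySem.List.enumerate_cons, ih]

theorem pvH_shift (a : String) (cl : List String) (k : ℕ) (x : String) :
    pvH (a :: cl) ((k : Int) + 1, x) = (pvH cl ((k : Int), x)).map (· + 1) := by
  have hget : PySem.List.pyGet? (a :: cl) ((k : Int) + 1 + 1) = PySem.List.pyGet? cl ((k : Int) + 1) := by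
    have h1 : ((k : Int) + 1 + 1) = (((k + 1 : ℕ) : Int) + 1) := by push_cast; ring
    have h2 : ((k : Int) + 1) = (((k + 1 : ℕ) : Int)) := by push_cast; ring
    rw [h1, PySem.List.pyGet?_cons_succ, h2]
  have hskip : pvSkip (a :: cl) ((k : Int) + 1) = pvSkip cl (k : Int) := by
    unfold pvSkip
    rw [hget]
    congr 1
    rw [decide_eq_decide]
    simp only [List.length_cons]
    push_cast
    omega
  simp only [pvH, hskip]
  split_ifs <;> simp

theorem pvRemove_cons (a : String) (cl : List String) :
    pvRemove (a :: cl) = pvH (a :: cl) (0, a) ++ (pvRemove cl).map (· + 1) := by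
  rw [pvRemove_eq_flatMap, pvRemove_eq_flatMap]
  rw [PySem.List.enumerate_cons]
  rw [show (0 : Int) + 1 = 0 + 1 from rfl, enum_shift]
  simp only [List.flatMap_cons, List.map_flatMap, List.flatMap_map]
  congr 1
  apply flatMap_congr'  -- pointwise on members of enumerate cl 0
  intro p hp
  rcases (PySem.List.mem_enumerate_iff _ _ _).1 hp with ⟨k, hk, rfl⟩
  simp only [Function.comp, zero_add]
  exact pvH_shift a cl k _

theorem pvRemove_nonneg (cl : List String) : ∀ j ∈ pvRemove cl, 0 ≤ j := by
  intro j hj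
  rw [pvRemove_eq_flatMap] at hj
  rcases List.mem_flatMap.1 hj with ⟨p, hp, hjp⟩
  rcases (PySem.List.mem_enumerate_iff _ _ _).1 hp with ⟨k, hk, rfl⟩
  simp only [pvH] at hjp
  split_ifs at hjp <;> simp_all <;> omega

-- generic filter-map half of B, with an arbitrary index predicate
def pvOut (q : Int → Bool) (cl : List String) : List String :=
  ((PySem.List.enumerate cl 0).filter (fun p => q p.1)).map (·.2)

theorem alt_eq_pvOut (cl : List String) :
    strip_output_flags_alt cl = pvOut (fun j => !((pvRemove cl).contains j)) cl := rfl

theorem pvOut_cons (q : Int → Bool) (a : String) (cl : List String) :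
    pvOut q (a :: cl) = (if q 0 then [a] else []) ++ pvOut (fun j => q (j + 1)) cl := by
  simp only [pvOut, PySem.List.enumerate_cons]
  rw [show (0 : Int) + 1 = 0 + 1 from rfl, enum_shift]
  rw [List.filter_cons, List.filter_map]
  split_ifs <;> simp [Function.comp_def]

theorem pvOut_congr (q q' : Int → Bool) (cl : List String)
    (h : ∀ k : ℕ, k < cl.length → q (k : Int) = q' (k : Int)) :
    pvOut q cl = pvOut q' cl := by
  unfold pvOut
  congr 1
  apply List.filter_congr
  intro p hp
  rcases (PySem.List.mem_enumerate_iff _ _ _).1 hp with ⟨k, hk, rfl⟩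
  simpa using h k hk

theorem mem_contains_int (l : List Int) (j : Int) : l.contains j = decide (j ∈ l) := by
  induction l with
  | nil => simp
  | cons x xs ih => by_cases h : j = x <;> simp_all [List.contains_cons]

theorem flags_start_dash (b : String) (hb : (b == "-oX" || b == "-oA") = true) :
    (b == "-" || !(PySem.Str.startswith b "-")) = false := by
  rcases Bool.or_eq_true_iff.1 hb with h | h <;>
    · rw [beq_iff_eq] at h; subst h; decide

theorem not_not_eq_true {b : Bool} (h : ¬ (!b) = true) : b = true := by
  cases b <;> simp_all

theorem bnot_eq_false {b : Bool} (h : (!b) = true) : b = false := by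
  cases b <;> simp_all

theorem mem_map_add_one (R : List Int) (j : Int) : (j + 1) ∈ R.map (· + 1) ↔ j ∈ R := by
  constructor
  · intro h
    rcases List.mem_map.1 h with ⟨r, hr, hr1⟩
    have : r = j := by omega
    rwa [this] at hr
  · intro h
    exact List.mem_map.2 ⟨_, h, rfl⟩

theorem A_nonflag (arg : String) (rest : List String)
    (h : (!(arg == "-oX" || arg == "-oA")) = true) :
    strip_output_flags (arg :: rest) = arg :: strip_output_flags rest := by
  rw [strip_output_flags.eq_def]
  simp [h]

theorem A_flag_nil (arg : String) (h : ¬ (!(arg == "-oX" || arg == "-oA")) = true) :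
    strip_output_flags [arg] = [] := by
  rw [strip_output_flags.eq_def]
  simp_all

theorem A_flag_skip (arg nxt : String) (rest' : List String)
    (h : ¬ (!(arg == "-oX" || arg == "-oA")) = true)
    (hs : (nxt == "-" || !(PySem.Str.startswith nxt "-")) = true) :
    strip_output_flags (arg :: nxt :: rest') = strip_output_flags rest' := by
  rw [strip_output_flags.eq_def]
  simp_all

theorem A_flag_noskip (arg nxt : String) (rest' : List String)
    (h : ¬ (!(arg == "-oX" || arg == "-oA")) = true)
    (hs : ¬ (nxt == "-" || !(PySem.Str.startswith nxt "-")) = true) :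
    strip_output_flags (arg :: nxt :: rest') = strip_output_flags (nxt :: rest') := by
  rw [strip_output_flags.eq_def]
  simp_all

theorem pvGet1_cons (arg : String) (rest : List String) :
    PySem.List.pyGet? (arg :: rest) ((0 : Int) + 1) = rest.head? := by
  have h := PySem.List.pyGet?_cons_succ (x := arg) (xs := rest) (n := 0)
  simp only [Nat.cast_zero] at h
  rw [h]
  cases rest with
  | nil => simp [PySem.List.pyGet?]
  | cons b bs => exact PySem.List.pyGet?_zero_cons b bs

theorem main_eq (cl : List String) : strip_output_flags cl = strip_output_flags_alt cl := by
  induction cl using strip_output_flags.induct with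
  | case1 =>
    rw [strip_output_flags.eq_def]
    rfl
  | case2 arg rest hflag ih =>
    -- arg is not a flag
    rw [A_nonflag arg rest hflag, alt_eq_pvOut, pvOut_cons, pvRemove_cons]
    have hH : pvH (arg :: rest) (0, arg) = [] := by
      simp [pvH, bnot_eq_false hflag]
    have h0 : ((pvRemove rest).map (· + 1)).contains (0 : Int) = false := by
      simp only [mem_contains_int, decide_eq_false_iff_not]
      intro hmem
      rcases List.mem_map.1 hmem with ⟨r, hr, hr1⟩
      have := pvRemove_nonneg rest r hr
      omega
    simp only [hH, List.nil_append, h0, Bool.not_false, if_pos]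
    congr 1
    rw [ih, alt_eq_pvOut]
    apply pvOut_congr
    intro k hk
    simp [mem_contains_int, mem_map_add_one]
  | case3 arg hflag =>
    -- arg is a flag, there is no next argument
    rw [A_flag_nil arg hflag, alt_eq_pvOut, pvOut_cons, pvRemove_cons]
    have hH : pvH ([arg] : List String) (0, arg) = [0] := by
      simp [pvH, pvSkip, not_not_eq_true hflag]
    simp [hH, mem_contains_int, pvOut, PySem.List.enumerate_nil]
  | case4 arg hflag nxt rest' hskip ih =>
    -- arg is a flag and the next argument is consumed
    rw [A_flag_skip arg nxt rest' hflag hskip, alt_eq_pvOut, pvOut_cons, pvRemove_cons]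
    have hget : PySem.List.pyGet? (arg :: nxt :: rest') ((0 : Int) + 1) = some nxt := by
      rw [pvGet1_cons]; rfl
    have hc : pvSkip (arg :: nxt :: rest') 0 = true := by
      unfold pvSkip
      rw [hget]
      show (decide ((0 : Int) + 1 < (((arg :: nxt :: rest').length : ℕ) : Int)) && (nxt == "-" || !PySem.Str.startswith nxt "-")) = true
      rw [hskip, Bool.and_true]
      exact decide_eq_true (by simp only [List.length_cons]; push_cast; omega)
    have hH : pvH (arg :: nxt :: rest') (0, arg) = [0, 1] := by
      simp [pvH, not_not_eq_true hflag, hc]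
    have hnxt : (nxt == "-oX" || nxt == "-oA") = false := by
      cases h : (nxt == "-oX" || nxt == "-oA") with
      | false => rfl
      | true => exact absurd hskip (by rw [flags_start_dash nxt h]; simp)
    have hrem : pvRemove (nxt :: rest') = (pvRemove rest').map (· + 1) := by
      rw [pvRemove_cons]
      have : pvH (nxt :: rest') (0, nxt) = [] := by
        simp [pvH, hnxt]
      rw [this, List.nil_append]
    rw [hH, hrem, pvOut_cons]
    have h0 : (([0, 1] : List Int) ++ (((pvRemove rest').map (· + 1)).map (· + 1))).contains (0 : Int) = true := by
      simp [mem_contains_int]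
    have h1 : (([0, 1] : List Int) ++ (((pvRemove rest').map (· + 1)).map (· + 1))).contains ((0 : Int) + 1) = true := by
      simp [mem_contains_int]
    simp only [h0, h1, Bool.not_true, Bool.false_eq_true, if_false, List.nil_append]
    rw [ih, alt_eq_pvOut]
    apply pvOut_congr
    intro k hk
    have hne0 : ¬ ((k : Int) + 1 + 1 = 0) := by omega
    have hne1 : ¬ ((k : Int) + 1 + 1 = 1) := by omega
    have hmm : ((k : Int) + 1 + 1) ∈ (((pvRemove rest').map (· + 1)).map (· + 1)) ↔ (k : Int) ∈ pvRemove rest' := by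
      rw [mem_map_add_one, mem_map_add_one]
    have hiff : (((k : Int) + 1 + 1) ∈ ([0, 1] : List Int) ++ (((pvRemove rest').map (· + 1)).map (· + 1))) ↔ (k : Int) ∈ pvRemove rest' := by
      rw [List.mem_append]
      constructor
      · rintro (h | h)
        · rcases List.mem_cons.1 h with h1 | h1
          · omega
          · rcases List.mem_cons.1 h1 with h2 | h2
            · omega
            · simp at h2
        · exact hmm.1 h
      · intro h
        exact Or.inr (hmm.2 h)
    simp only [mem_contains_int]
    congr 1
    rw [decide_eq_decide]
    first
    | exact hiff
    | exact hiff.symm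
  | case5 arg hflag nxt rest' hskip ih =>
    -- arg is a flag and the next argument stays (it is itself dash-prefixed)
    rw [A_flag_noskip arg nxt rest' hflag hskip, alt_eq_pvOut, pvOut_cons, pvRemove_cons]
    have hget : PySem.List.pyGet? (arg :: nxt :: rest') ((0 : Int) + 1) = some nxt := by
      rw [pvGet1_cons]; rfl
    have hs : (nxt == "-" || !(PySem.Str.startswith nxt "-")) = false := by
      cases h : (nxt == "-" || !(PySem.Str.startswith nxt "-"))
      · rfl
      · exact absurd h hskip
    have hc : pvSkip (arg :: nxt :: rest') 0 = false := by
      unfold pvSkip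
      rw [hget]
      show (decide ((0 : Int) + 1 < (((arg :: nxt :: rest').length : ℕ) : Int)) && (nxt == "-" || !PySem.Str.startswith nxt "-")) = false
      rw [hs, Bool.and_false]
    have hH : pvH (arg :: nxt :: rest') (0, arg) = [0] := by
      simp [pvH, not_not_eq_true hflag, hc]
    have h0 : (([0] : List Int) ++ ((pvRemove (nxt :: rest')).map (· + 1))).contains (0 : Int) = true := by
      simp [mem_contains_int]
    rw [hH]
    simp only [h0, Bool.not_true, Bool.false_eq_true, if_false, List.nil_append]
    rw [ih, alt_eq_pvOut]
    apply pvOut_congr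
    intro k hk
    have hne0 : ¬ ((k : Int) + 1 = 0) := by omega
    simp [mem_contains_int, hne0, mem_map_add_one]

-- ===== VERDICT (by name: the statement is the Claim_ definition above) =====
theorem strip_output_flags_spec : Claim_equal_strip_output_flags := by
  intro cl _
  unfold Spec_strip_output_flags
  exact main_eq cl
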